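-- pv_equiv track=rewrite | github.com/muhammad-zainal-muttaqin/Anylabel | Experiments/scripts/simple_eda.py | parse_numeric_id
-- ===== SOURCE A (Python) =====
-- def parse_numeric_id(filename: str):
--     digits = "".join([c for c in filename if c.isdigit()])
--     if not digits:
--         return None
--     try:
--         return int(digits)
--     except Exception:
--         return None
-- ===== SOURCE B (Python) =====
-- def parse_numeric_id(filename: str):
--     found = False
--     result = 0
--     for c in filename:
--         if '0' <= c <= '9':
--             found = True
--             result = result * 10 + (ord(c) - 48)
--     return result if found else None
-- ===== Notes on version B (the rewrite author's own statement) =====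
-- stated objective: alternative
-- what changed: Instead of building an intermediate digit string with a list comprehension plus join and parsing it with int(), B accumulates the integer value directly in one pass over the characters (result = result*10 + digit) with a found-flag.
import Mathlib
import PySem

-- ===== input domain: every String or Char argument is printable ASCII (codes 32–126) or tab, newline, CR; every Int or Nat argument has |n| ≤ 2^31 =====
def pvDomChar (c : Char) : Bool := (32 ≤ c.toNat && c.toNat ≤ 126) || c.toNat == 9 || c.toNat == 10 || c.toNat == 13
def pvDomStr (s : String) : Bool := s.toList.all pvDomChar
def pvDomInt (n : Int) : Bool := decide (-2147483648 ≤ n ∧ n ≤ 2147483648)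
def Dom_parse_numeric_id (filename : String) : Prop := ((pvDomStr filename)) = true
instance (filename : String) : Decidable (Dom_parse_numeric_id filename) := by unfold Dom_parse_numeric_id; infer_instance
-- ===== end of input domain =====

-- B replaces A's join-the-digit-characters-then-int() with a single pass that accumulates
-- the integer value directly (result*10 + digit) under a found-flag (alternative decomposition, same cost).

-- ===== PORT A =====
def parse_numeric_id (filename : String) : Option Int :=
  let digits := List.filter PySem.Chars.isdigit filename.toList   -- "".join([c for c in filename if c.isdigit()])
  if digits = [] then none                                        -- if not digits: return None
  else
    match PySem.Int.ofChars? digits with                          -- try: return int(digits)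
    | some v => some v
    | none => none                                                -- except Exception: return None

-- ===== PORT B =====
def pyStepB (p : Bool × Int) (c : Char) : Bool × Int :=
  if '0' ≤ c ∧ c ≤ '9' then (true, p.2 * 10 + ((c.toNat : Int) - 48)) else p

def parse_numeric_id_alt (filename : String) : Option Int :=
  let st := filename.toList.foldl pyStepB (false, 0)
  if st.1 then some st.2 else none

-- ===== PRECONDITION & SPEC =====
def Spec_parse_numeric_id (filename : String) (out : Option Int) : Prop := out = parse_numeric_id_alt filename
instance (filename : String) (out : Option Int) : Decidable (Spec_parse_numeric_id filename out) := by unfold Spec_parse_numeric_id; infer_instance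

-- ===== CLAIM (what is proved, stated in full; the proofs are below) =====
def Claim_equal_parse_numeric_id : Prop := ∀ (filename : String), Dom_parse_numeric_id filename → Spec_parse_numeric_id filename (parse_numeric_id filename)

-- ===== LEMMAS AND PROOFS =====

def natStep (r : Nat) (c : Char) : Nat := r * 10 + (c.toNat - '0'.toNat)
def intStep (r : Int) (c : Char) : Int := r * 10 + ((c.toNat : Int) - 48)

theorem isIntSpace_of_digit (c : Char) (h : PySem.Chars.isdigit c = true) :
    PySem.Int.isIntSpace c = false := by
  simp only [PySem.Chars.isdigit, Bool.and_eq_true, decide_eq_true_eq, Char.le_def] at h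
  simp only [PySem.Int.isIntSpace, Bool.or_eq_false_iff, decide_eq_false_iff_not, Char.ext_iff]
  refine ⟨⟨⟨⟨⟨?_,?_⟩,?_⟩,?_⟩,?_⟩,?_⟩ <;> (intro he; rw [he] at h; exact absurd h (by decide))

theorem isDigit_of_digit (c : Char) (h : PySem.Chars.isdigit c = true) : c.isDigit = true := by
  simp only [PySem.Chars.isdigit, Bool.and_eq_true, decide_eq_true_eq, Char.le_def] at h
  simp only [Char.isDigit, Bool.and_eq_true, decide_eq_true_eq]
  exact ⟨h.1, h.2⟩

theorem ne_minus_of_digit (c : Char) (h : PySem.Chars.isdigit c = true) : c ≠ '-' := by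
  intro he; subst he; simp [PySem.Chars.isdigit, Char.le_def] at h
theorem ne_plus_of_digit (c : Char) (h : PySem.Chars.isdigit c = true) : c ≠ '+' := by
  intro he; subst he; simp [PySem.Chars.isdigit, Char.le_def] at h

theorem helperMap (o : Option Nat) (v : Nat) (h : o = some v) :
    Option.map (fun n : Int => n) (o >>= fun a => pure ((a : Int))) = some ((v : Nat) : Int) := by
  subst h; rfl

-- A's int() on the nonempty all-digit string: its value is the left fold `natStep`.
theorem ofChars?_digits (c : Char) (t : List Char)
    (h : ∀ x ∈ c :: t, PySem.Chars.isdigit x = true) :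
    PySem.Int.ofChars? (c :: t) = some ((List.foldl natStep 0 (c :: t) : Nat) : Int) := by
  unfold PySem.Int.ofChars?
  have h1 : List.dropWhile PySem.Int.isIntSpace (c :: t) = c :: t := by
    rw [List.dropWhile_cons_of_neg]
    simp [isIntSpace_of_digit c (h c (by simp))]
  have h2 : List.dropWhile PySem.Int.isIntSpace (c :: t).reverse = (c :: t).reverse := by
    apply List.dropWhile_eq_self_iff.mpr
    intro hd
    have hm : (c :: t).reverse[0] ∈ c :: t := by
      rw [← List.mem_reverse]; exact List.getElem_mem hd
    simp only [isIntSpace_of_digit _ (h _ hm)]; simp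
  rw [h1, h2, List.reverse_reverse]
  conv => lhs; whnf
  split
  · rename_i ds heq
    exact absurd (List.cons.inj heq).1 (ne_minus_of_digit c (h c (by simp)))
  · rename_i ds heq
    exact absurd (List.cons.inj heq).1 (ne_plus_of_digit c (h c (by simp)))
  · rename_i cs0 hA hB
    clear hA hB
    apply helperMap
    -- goal: <private digitsVal?> (c :: t) = some (List.foldl natStep 0 (c :: t))
    rw [List.foldl_cons]
    have hd0 : natStep 0 c = 0 * 10 + (c.toNat - '0'.toNat) := rfl
    conv => lhs; whnf
    rw [isDigit_of_digit c (h c (by simp))]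
    conv => lhs; whnf
    rw [← hd0]
    have ht : ∀ x ∈ t, PySem.Chars.isdigit x = true := fun x hx => h x (by simp [hx])
    clear h h1 h2 hd0 cs0
    generalize natStep 0 c = acc
    induction t generalizing acc with
    | nil => conv => lhs; whnf
             rfl
    | cons d t' ih =>
      conv => lhs; whnf
      rw [isDigit_of_digit d (ht d (by simp))]
      conv => lhs; whnf
      rw [List.foldl_cons, show acc * 10 + (d.toNat - '0'.toNat) = natStep acc d from rfl]
      exact ih (fun x hx => ht x (by simp [hx])) (natStep acc d)

theorem pyStepB_digit (p : Bool × Int) (c : Char) (h : PySem.Chars.isdigit c = true) :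
    pyStepB p c = (true, intStep p.2 c) := by
  simp only [PySem.Chars.isdigit, Bool.and_eq_true, decide_eq_true_eq] at h
  simp [pyStepB, intStep, h.1, h.2]

theorem pyStepB_nondigit (p : Bool × Int) (c : Char) (h : PySem.Chars.isdigit c = false) :
    pyStepB p c = p := by
  simp only [PySem.Chars.isdigit, Bool.and_eq_false_iff, decide_eq_false_iff_not] at h
  unfold pyStepB
  rw [if_neg]
  rintro ⟨h1, h2⟩
  rcases h with h' | h' <;> exact absurd (by assumption) h'

-- B's loop in closed form: the found-flag is "some digit seen", the value folds over the digits.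
theorem foldlB (cs : List Char) : ∀ (b : Bool) (r : Int),
    cs.foldl pyStepB (b, r) =
      (b || cs.any PySem.Chars.isdigit,
       List.foldl intStep r (List.filter PySem.Chars.isdigit cs)) := by
  induction cs with
  | nil => intro b r; simp
  | cons c t ih =>
    intro b r
    by_cases hc : PySem.Chars.isdigit c = true
    · rw [List.foldl_cons, pyStepB_digit _ _ hc, ih, List.any_cons, List.filter_cons_of_pos hc,
        List.foldl_cons, hc]
      simp
    · rw [List.foldl_cons, pyStepB_nondigit _ _ (by simpa using hc), ih, List.any_cons,
        List.filter_cons_of_neg (by simpa using hc), (by simpa using hc : PySem.Chars.isdigit c = false)]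
      simp

theorem castFold (ds : List Char) : ∀ (a : Nat),
    (∀ x ∈ ds, PySem.Chars.isdigit x = true) →
    List.foldl intStep ((a : Nat) : Int) ds = ((List.foldl natStep a ds : Nat) : Int) := by
  induction ds with
  | nil => intro a _; rfl
  | cons d t ih =>
    intro a h
    have hd := h d (by simp)
    simp only [PySem.Chars.isdigit, Bool.and_eq_true, decide_eq_true_eq, Char.le_def] at hd
    have h48 : '0'.toNat ≤ d.toNat := by
      have := hd.1
      simpa [Char.le_def] using this
    rw [List.foldl_cons, List.foldl_cons]
    have hstep : intStep ((a : Nat) : Int) d = ((natStep a d : Nat) : Int) := by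
      unfold intStep natStep
      have : ((d.toNat - '0'.toNat : Nat) : Int) = (d.toNat : Int) - 48 := by
        have : '0'.toNat = 48 := rfl
        omega
      omega
    rw [hstep]
    exact ih (natStep a d) (fun x hx => h x (by simp [hx]))

-- ===== VERDICT (by name: the statement is the Claim_ definition above) =====
theorem parse_numeric_id_spec : Claim_equal_parse_numeric_id := by
  intro filename _
  unfold Spec_parse_numeric_id parse_numeric_id parse_numeric_id_alt
  rw [foldlB]
  cases hfil : List.filter PySem.Chars.isdigit filename.toList with
  | nil =>
    rw [if_pos rfl, Bool.false_or]
    have hany : filename.toList.any PySem.Chars.isdigit = false := by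
      rw [List.any_eq_false]
      intro x hx hd
      have : x ∈ List.filter PySem.Chars.isdigit filename.toList := List.mem_filter.mpr ⟨hx, hd⟩
      rw [hfil] at this
      simp at this
    rw [hany]
    rfl
  | cons c t =>
    have hmem : ∀ x ∈ c :: t, PySem.Chars.isdigit x = true := by
      intro x hx
      rw [← hfil] at hx
      exact (List.mem_filter.mp hx).2
    have hany : filename.toList.any PySem.Chars.isdigit = true := by
      rw [List.any_eq_true]
      have hc : c ∈ List.filter PySem.Chars.isdigit filename.toList := by rw [hfil]; simp
      exact ⟨c, (List.mem_filter.mp hc).1, (List.mem_filter.mp hc).2⟩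
    rw [if_neg (by simp), hany, Bool.false_or, if_pos rfl]
    rw [ofChars?_digits c t hmem]
    have : ((0 : Nat) : Int) = (0 : Int) := rfl
    rw [← this, castFold (c :: t) 0 hmem]
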